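-- pv_equiv track=rewrite | github.com/IPGP/geodezyx | geodezyx/legacy_source/lib/discontinued_bc_transfered/geodetik_legacy.py | group_consecutives
-- ===== SOURCE A (Python) =====
-- def group_consecutives(vals, step=1):
--     """
--     Return list of consecutive lists of numbers from vals (number list).
--     """
--     run = []
--     result = [run]
--     expect = None
--     for v in vals:
--         if (v == expect) or (expect is None):
--             run.append(v)
--         else:
--             run = [v]
--             result.append(run)
--         expect = v + step
--
--         result2 = []
--         for r in result:
--             if len(r) > 1:
--                 result2.append([r[0],r[-1]])
--             else:
--                 result2.append(r)
--
--     return result2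
-- ===== SOURCE B (Python) =====
-- def group_consecutives(vals, step=1):
--     """
--     Return list of consecutive lists of numbers from vals (number list).
--     Two-pointer scan over indices: j races ahead of i to the end of the
--     current run, the run's endpoints are emitted directly, then i jumps to j.
--     (A raises NameError on empty vals; B returns [].)
--     """
--     if not vals:
--         return []
--     out = []
--     i, n = 0, len(vals)
--     while i < n:
--         j = i + 1
--         while j < n and vals[j] == vals[j - 1] + step:
--             j += 1
--         out.append([vals[i]] if j == i + 1 else [vals[i], vals[j - 1]])
--         i = j
--     return out
-- ===== Notes on version B (the rewrite author's own statement) =====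
-- stated objective: faster
-- what changed: A grows per-run lists element by element and recomputes the whole condensed result2 from every run on every loop iteration (quadratic); B is a two-pointer index scan: j advances to the end of the current run, the [first,last] (or singleton) entry is emitted once, and i jumps to j; empty input, on which A raises NameError, is excluded by Pre_ and B returns [] there.
-- outside the precondition, e.g. on group_consecutives([], 1): A raises UnboundLocalError, B returns []
import Mathlib
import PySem

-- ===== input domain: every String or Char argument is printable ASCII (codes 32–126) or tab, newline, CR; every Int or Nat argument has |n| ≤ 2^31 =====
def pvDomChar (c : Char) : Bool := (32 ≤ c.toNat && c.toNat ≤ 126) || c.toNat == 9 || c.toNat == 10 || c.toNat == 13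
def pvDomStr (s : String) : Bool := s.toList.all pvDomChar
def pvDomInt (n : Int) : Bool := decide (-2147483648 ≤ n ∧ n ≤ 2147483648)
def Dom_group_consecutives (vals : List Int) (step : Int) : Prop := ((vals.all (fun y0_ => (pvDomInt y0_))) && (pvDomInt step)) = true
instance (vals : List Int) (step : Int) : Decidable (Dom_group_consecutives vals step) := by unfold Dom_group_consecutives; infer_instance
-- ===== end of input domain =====

-- B replaces A's per-iteration recondensing of every run (quadratic) by a two-pointer index
-- scan emitting each run's endpoints once (asymptotically faster, as measured by the check);
-- on empty vals A raises NameError (excluded by Pre_) and B returns [].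


-- ===== PORT A =====
-- 'run' is always an alias of the LAST list inside 'result' (it is appended to result on
-- creation), so Python's run.append(v) mutates result's last element: modelled by appendToLastRun.
def appendToLastRun : List (List Int) → Int → List (List Int)
  | [], _ => []
  | [r], v => [r ++ [v]]
  | r :: rs, v => r :: appendToLastRun rs v

-- inner 'for r in result' body; the guard len(r) > 1 ensures r[0] and r[-1] exist,
-- so headD 0 / getLastD 0 are exact there.
def condenseRun (r : List Int) : List Int :=
  if 1 < r.length then [r.headD 0, r.getLastD 0] else r

-- body of A's outer loop; state = (result, expect, result2)
def stepA (step : Int) (st : List (List Int) × Option Int × List (List Int)) (v : Int) :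
    List (List Int) × Option Int × List (List Int) :=
  let result1 := if st.2.1 = some v ∨ st.2.1 = none then appendToLastRun st.1 v else st.1 ++ [[v]]
  (result1, some (v + step), result1.map condenseRun)

-- on empty vals Python raises NameError (result2 never assigned) — excluded by Pre_.
def group_consecutives (vals : List Int) (step : Int) : List (List Int) :=
  (vals.foldl (stepA step) ([[]], none, [])).2.2

-- ===== PORT B =====
-- inner 'while j < n and vals[j] == vals[j-1] + step: j += 1'; all indices reached are
-- in range (1 ≤ j) so getD is exact; fuel = vals.length bounds the iterations (j is
-- strictly increasing and stops at n), making the loop total without changing its value.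
def runEnd (vals : List Int) (step : Int) : Nat → Nat → Nat
  | 0, j => j
  | fuel + 1, j =>
    if j < vals.length ∧ vals.getD j 0 = vals.getD (j - 1) 0 + step
    then runEnd vals step fuel (j + 1) else j

-- outer 'while i < n' loop carrying the output list; fuel = vals.length again bounds
-- the iterations (i jumps to runEnd … ≥ i + 1 each time)
def bLoop (vals : List Int) (step : Int) : Nat → Nat → List (List Int) → List (List Int)
  | 0, _, out => out
  | fuel + 1, i, out =>
    if i < vals.length then
      let j := runEnd vals step vals.length (i + 1)
      bLoop vals step fuel j
        (out ++ [if j = i + 1 then [vals.getD i 0] else [vals.getD i 0, vals.getD (j - 1) 0]])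
    else out

def group_consecutives_alt (vals : List Int) (step : Int) : List (List Int) :=
  if vals = [] then [] else bLoop vals step vals.length 0 []

-- ===== PRECONDITION & SPEC =====
-- Pre_ excludes exactly the empty list, on which Python A raises NameError.
def Pre_group_consecutives (vals : List Int) (step : Int) : Prop := vals ≠ []
instance (vals : List Int) (step : Int) : Decidable (Pre_group_consecutives vals step) := by unfold Pre_group_consecutives; infer_instance
def pvWitness_group_consecutives : List Int × Int := ([1, 2, 3, 7], 1)

def Spec_group_consecutives (vals : List Int) (step : Int) (out : List (List Int)) : Prop := out = group_consecutives_alt vals step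
instance (vals : List Int) (step : Int) (out : List (List Int)) : Decidable (Spec_group_consecutives vals step out) := by unfold Spec_group_consecutives; infer_instance

-- ===== CLAIM (what is proved, stated in full; the proofs are below) =====
def Claim_equal_group_consecutives : Prop := ∀ (vals : List Int) (step : Int), Dom_group_consecutives vals step → Pre_group_consecutives vals step → Spec_group_consecutives vals step (group_consecutives vals step)

-- ===== LEMMAS AND PROOFS =====

-- common reference: the run decomposition of vals, consumed element by element;
-- r is the current run, p its last element
def consume (step : Int) (r : List Int) (p : Int) : List Int → List (List Int)
  | [] => [r]
  | w :: vs => if w = p + step then consume step (r ++ [w]) w vs else r :: consume step [w] w vs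

theorem appendToLastRun_append (R : List (List Int)) (r : List Int) (v : Int) :
    appendToLastRun (R ++ [r]) v = R ++ [r ++ [v]] := by
  induction R with
  | nil => rfl
  | cons a R ih =>
    obtain ⟨b, l, hx⟩ := List.exists_cons_of_ne_nil (List.append_ne_nil_of_right_ne_nil R (by simp : ([r] : List (List Int)) ≠ []))
    calc appendToLastRun ((a :: R) ++ [r]) v
        = a :: appendToLastRun (R ++ [r]) v := by rw [List.cons_append, hx]; rfl
      _ = a :: (R ++ [r ++ [v]]) := by rw [ih]
      _ = (a :: R) ++ [r ++ [v]] := rfl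

-- A's fold keeps result2 = result.map condenseRun once that holds
theorem third_eq_map (step : Int) (vs : List Int) :
    ∀ (R : List (List Int)) (e : Option Int),
    (vs.foldl (stepA step) (R, e, R.map condenseRun)).2.2
      = ((vs.foldl (stepA step) (R, e, R.map condenseRun)).1).map condenseRun := by
  induction vs with
  | nil => intro R e; rfl
  | cons v vs ih =>
    intro R e
    simp only [List.foldl, stepA]
    split_ifs with h
    · exact ih (appendToLastRun R v) (some (v + step))
    · exact ih (R ++ [[v]]) (some (v + step))

-- A's fold computes the run decomposition
theorem foldA_consume (step : Int) (vs : List Int) :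
    ∀ (R : List (List Int)) (r : List Int) (p : Int) (X : List (List Int)),
    (vs.foldl (stepA step) (R ++ [r], some (p + step), X)).1 = R ++ consume step r p vs := by
  induction vs with
  | nil => intro R r p X; simp [List.foldl, consume]
  | cons w vs ih =>
    intro R r p X
    simp only [List.foldl, stepA]
    by_cases hw : w = p + step
    · have hc : ((some (p + step) : Option Int) = some w ∨ (some (p + step) : Option Int) = none) := by
        simp [hw]
      rw [if_pos hc, appendToLastRun_append]
      rw [ih R (r ++ [w]) w _]
      simp [consume, hw]
    · have hc : ¬ ((some (p + step) : Option Int) = some w ∨ (some (p + step) : Option Int) = none) := by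
        simp; omega
      rw [if_neg hc]
      have : (R ++ [r]) ++ [[w]] = (R ++ [r]) ++ [[w]] := rfl
      rw [List.append_assoc R [r] [[w]]] at this
      calc (vs.foldl (stepA step) ((R ++ [r]) ++ [[w]], some (w + step), ((R ++ [r]) ++ [[w]]).map condenseRun)).1
          = (R ++ [r]) ++ consume step [w] w vs := ih (R ++ [r]) [w] w _
        _ = R ++ consume step r p (w :: vs) := by simp [consume, hw]

-- condenseRun determined by head, last and length
theorem condense_eq (r : List Int) (x y : Int) (hh : r.head? = some x)
    (hl : r.getLast? = some y) :
    condenseRun r = if r.length = 1 then [x] else [x, y] := by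
  cases r with
  | nil => simp at hh
  | cons a r' =>
    have hax : a = x := by simpa using hh
    cases r' with
    | nil =>
      simp [condenseRun, hax]
    | cons b r'' =>
      have hlen : 1 < (a :: b :: r'').length := by simp
      have hne : (a :: b :: r'').length ≠ 1 := by omega
      have hl2 : (b :: r'').getLast? = some y := by
        rw [← List.getLast?_cons_cons (a := a)]; exact hl
      simp only [condenseRun, if_pos hlen, if_neg hne]
      simp [List.headD, hax, List.getLastD_eq_getLast?, hl2]

-- B-side abbreviations (used only in the proofs)
def condOut (vals : List Int) (i j : Nat) : List Int :=
  if j = i + 1 then [vals.getD i 0] else [vals.getD i 0, vals.getD (j - 1) 0]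

def tailG (vals : List Int) (step : Int) (j : Nat) : List (List Int) :=
  if j < vals.length then
    (consume step [vals.getD j 0] (vals.getD j 0) (vals.drop (j + 1))).map condenseRun
  else []

theorem runEnd_ge (vals : List Int) (step : Int) :
    ∀ (fuel j : Nat), j ≤ runEnd vals step fuel j := by
  intro fuel
  induction fuel with
  | zero => intro j; exact Nat.le_refl j
  | succ fuel ih =>
    intro j
    rw [runEnd]
    split
    · exact Nat.le_trans (Nat.le_succ j) (ih (j + 1))
    · exact Nat.le_refl j

theorem condense_condOut (vals : List Int) (i j : Nat) (r : List Int) (hij : i < j)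
    (hh : r.head? = some (vals.getD i 0)) (hl : r.getLast? = some (vals.getD (j - 1) 0))
    (hlen : r.length = j - i) : condenseRun r = condOut vals i j := by
  rw [condense_eq r _ _ hh hl]
  unfold condOut
  rcases Nat.eq_or_lt_of_le (Nat.succ_le_of_lt hij) with h1 | h1
  · rw [if_pos h1.symm, if_pos (by omega : r.length = 1)]
  · rw [if_neg (by omega), if_neg (by omega)]

-- the inner while loop versus the run decomposition (fuel ≥ vals.length - j suffices)
theorem consume_split (vals : List Int) (step : Int) (i : Nat) :
    ∀ (fuel j : Nat) (r : List Int), vals.length ≤ j + fuel → i < j → j ≤ vals.length →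
    r.head? = some (vals.getD i 0) → r.getLast? = some (vals.getD (j - 1) 0) →
    r.length = j - i →
    (consume step r (vals.getD (j - 1) 0) (vals.drop j)).map condenseRun
      = condOut vals i (runEnd vals step fuel j) :: tailG vals step (runEnd vals step fuel j) := by
  intro fuel
  induction fuel with
  | zero =>
    intro j r hfuel hij hjn hh hl hlen
    have hjeq : j = vals.length := by omega
    have hdrop : vals.drop j = [] := List.drop_eq_nil_of_le (by omega)
    rw [hdrop]
    simp only [consume, List.map, runEnd]
    rw [condense_condOut vals i j r hij hh hl hlen]
    unfold tailG
    rw [if_neg (by omega)]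
  | succ fuel ih =>
    intro j r hfuel hij hjn hh hl hlen
    rw [runEnd]
    split
    next h =>
      obtain ⟨hjlt, hstep⟩ := h
      have hdrop : vals.drop j = vals.getD j 0 :: vals.drop (j + 1) := by
        rw [List.getD_eq_getElem _ _ hjlt, List.drop_eq_getElem_cons hjlt]
      rw [hdrop]
      simp only [consume, if_pos hstep]
      have hr_ne : r ≠ [] := by intro hx; subst hx; simp at hh
      refine ih (j + 1) (r ++ [vals.getD j 0]) (by omega) (by omega) (by omega) ?_ ?_ ?_
      · cases r with
        | nil => exact absurd rfl hr_ne
        | cons a r' => simpa using hh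
      · simp
      · simp; omega
    next h =>
      have hcond : condenseRun r = condOut vals i j := condense_condOut vals i j r hij hh hl hlen
      by_cases hjlt : j < vals.length
      · have hne : vals.getD j 0 ≠ vals.getD (j - 1) 0 + step := by
          intro hx; exact h ⟨hjlt, hx⟩
        have hdrop : vals.drop j = vals.getD j 0 :: vals.drop (j + 1) := by
          rw [List.getD_eq_getElem _ _ hjlt, List.drop_eq_getElem_cons hjlt]
        rw [hdrop]
        simp only [consume, if_neg hne, List.map, hcond]
        unfold tailG
        rw [if_pos hjlt]
      · have hdrop : vals.drop j = [] := List.drop_eq_nil_of_le (by omega)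
        rw [hdrop]
        simp only [consume, List.map, hcond]
        unfold tailG
        rw [if_neg hjlt]

-- the outer while loop appends the condensed suffix (fuel ≥ vals.length - i suffices)
theorem bLoop_spec (vals : List Int) (step : Int) :
    ∀ (fuel i : Nat) (out : List (List Int)), vals.length ≤ i + fuel →
    bLoop vals step fuel i out = out ++ tailG vals step i := by
  intro fuel
  induction fuel with
  | zero =>
    intro i out hfuel
    simp only [bLoop]
    unfold tailG
    rw [if_neg (by omega)]
    simp
  | succ fuel ih =>
    intro i out hfuel
    rw [bLoop]
    split
    next h =>
      have hge := runEnd_ge vals step vals.length (i + 1)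
      rw [ih (runEnd vals step vals.length (i + 1)) _ (by omega)]
      have hsplit := consume_split vals step i vals.length (i + 1) [vals.getD i 0]
        (by omega) (Nat.lt_succ_self i) h rfl (by simp) (by simp)
      have htg : tailG vals step i
          = condOut vals i (runEnd vals step vals.length (i + 1))
            :: tailG vals step (runEnd vals step vals.length (i + 1)) := by
        unfold tailG
        rw [if_pos h]
        simpa using hsplit
      rw [htg]
      simp [condOut, List.append_assoc]
    next h => simp [tailG, if_neg h]

-- ===== VERDICT (by name: the statement is the Claim_ definition above) =====
theorem group_consecutives_spec : Claim_equal_group_consecutives := by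
  intro vals step _ hpre
  unfold Spec_group_consecutives
  cases vals with
  | nil => exact absurd rfl hpre
  | cons v vs =>
    unfold group_consecutives group_consecutives_alt
    rw [if_neg (by simp : (v :: vs : List Int) ≠ [])]
    rw [bLoop_spec (v :: vs) step (v :: vs).length 0 [] (by omega)]
    have h0 : (0 : Nat) < (v :: vs).length := by simp
    have htg : tailG (v :: vs) step 0 = (consume step [v] v vs).map condenseRun := by
      unfold tailG
      rw [if_pos h0]
      simp
    rw [htg, List.nil_append]
    -- A side: peel off the first element, then use the two fold lemmas
    have hfirst : stepA step ([[]], none, []) v = ([[v]], some (v + step), [[v]]) := by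
      simp [stepA, appendToLastRun, condenseRun]
    show ((v :: vs).foldl (stepA step) ([[]], none, [])).2.2 = _
    rw [List.foldl_cons, hfirst]
    have hmap : ([[v]] : List (List Int)).map condenseRun = [[v]] := by simp [condenseRun]
    have h3 := third_eq_map step vs [[v]] (some (v + step))
    rw [hmap] at h3
    rw [h3]
    have h1 := foldA_consume step vs [] [v] v [[v]]
    simp only [List.nil_append] at h1
    have : some (v + step) = some (v + step) := rfl
    rw [h1]
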